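-- pv_equiv track=rewrite | github.com/jabing/NovelWriter | LSP/novelwriter_lsp/features/hover.py | _extract_word
-- ===== SOURCE A (Python) =====
-- def _extract_word(line: str, position: int) -> str:
--     """
--     Extract a complete word from a line at the given character position.
--
--     Args:
--         line: The line of text
--         position: Character position within the line
--
--     Returns:
--         The complete word containing the position
--     """
--     if not line or position < 0 or position >= len(line):
--         return ""
--
--     start = position
--     while start > 0 and (line[start - 1].isalnum() or line[start - 1] == "_"):
--         start -= 1
--
--     end = position
--     while end < len(line) and (line[end].isalnum() or line[end] == "_"):
--         end += 1
--
--     word = line[start:end].strip()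
--     return word
-- ===== SOURCE B (Python) =====
-- def _extract_word(line: str, position: int) -> str:
--     """Single left-to-right pass grouping maximal word-char runs; return the run
--     whose span [s, e] contains position (e inclusive, so a position just past a
--     word still yields that word, as in A)."""
--     if not line or position < 0 or position >= len(line):
--         return ""
--     s = None
--     for i, c in enumerate(line):
--         w = c.isalnum() or c == "_"
--         if s is None:
--             if w:
--                 s = i
--         else:
--             if not w:
--                 if s <= position <= i:
--                     return line[s:i]
--                 s = None
--     if s is not None and s <= position:
--         return line[s:]
--     return ""
-- ===== Notes on version B (the rewrite author's own statement) =====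
-- stated objective: alternative
-- what changed: A scans outward from the position with two index-based while-loops and then slices and strips; B makes one left-to-right pass over the characters grouping maximal word-char runs and returns the run whose inclusive span covers the position, with no strip() needed.
import Mathlib
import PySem

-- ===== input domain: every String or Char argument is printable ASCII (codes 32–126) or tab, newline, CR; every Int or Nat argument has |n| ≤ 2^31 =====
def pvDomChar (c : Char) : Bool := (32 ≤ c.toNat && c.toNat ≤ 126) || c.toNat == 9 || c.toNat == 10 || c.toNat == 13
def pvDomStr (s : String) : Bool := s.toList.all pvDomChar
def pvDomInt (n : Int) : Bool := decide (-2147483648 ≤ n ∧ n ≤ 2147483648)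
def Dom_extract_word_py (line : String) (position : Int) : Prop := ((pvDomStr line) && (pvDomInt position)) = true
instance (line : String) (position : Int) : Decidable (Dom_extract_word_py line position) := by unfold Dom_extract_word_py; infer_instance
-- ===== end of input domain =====

-- B replaces A's two outward while-scans from `position` by one left-to-right pass
-- grouping maximal word-char runs and returning the span covering the position
-- (objective: alternative decomposition; measured constant-factor faster in a timing run).


-- ===== PORT A =====
-- the word-character test `c.isalnum() or c == "_"` (shared verbatim by both Pythons)
def isW (c : Char) : Bool := PySem.Chars.isalnum c || c == '_'

-- `while start > 0 and (line[start-1].isalnum() or line[start-1] == "_"): start -= 1`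
-- (the index start-1 is always in range at every call site, so getD is exact)
def goLeft (cs : List Char) : Nat → Nat
  | 0 => 0
  | s + 1 => if isW (cs.getD s ' ') then goLeft cs s else s + 1

-- `while end < len(line) and (line[end].isalnum() or line[end] == "_"): end += 1`
-- (the index is read only under the `e < len` conjunct, so getD is exact)
def goRight (cs : List Char) (e : Nat) : Nat :=
  if h : e < cs.length ∧ isW (cs.getD e ' ') then goRight cs (e + 1) else e
termination_by cs.length - e
decreasing_by omega

def extract_word_py (line : String) (position : Int) : String :=
  let cs := line.toList
  -- `if not line or position < 0 or position >= len(line): return ""`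
  if cs.isEmpty || position < 0 || (cs.length : Int) ≤ position then ""
  else
    let p := position.toNat   -- exact: 0 ≤ position here
    let s := goLeft cs p
    let e := goRight cs p
    -- `word = line[start:end].strip(); return word`
    String.ofList (PySem.Chars.strip (PySem.Chars.slice cs (some (s : Int)) (some (e : Int))))

-- ===== PORT B =====
-- one pass over the characters with running index i and open-run start s (none = no open run);
-- `line[s:i]` / `line[s:]` with 0 ≤ s ≤ i ≤ len are exactly drop/take
def runScan (l : List Char) (p : Nat) : List Char → Nat → Option Nat → String
  | [], _, s =>
    match s with
    | some st => if st ≤ p then String.ofList (l.drop st) else ""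
    | none => ""
  | c :: rest, i, s =>
    match s with
    | none =>
      if isW c then runScan l p rest (i + 1) (some i) else runScan l p rest (i + 1) none
    | some st =>
      if isW c then runScan l p rest (i + 1) (some st)
      else if st ≤ p ∧ p ≤ i then String.ofList ((l.drop st).take (i - st))
      else runScan l p rest (i + 1) none

def extract_word_py_alt (line : String) (position : Int) : String :=
  let cs := line.toList
  if cs.isEmpty || position < 0 || (cs.length : Int) ≤ position then ""
  else runScan cs position.toNat cs 0 none

-- ===== PRECONDITION & SPEC =====
def Spec_extract_word_py (line : String) (position : Int) (out : String) : Prop := out = extract_word_py_alt line position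
instance (line : String) (position : Int) (out : String) : Decidable (Spec_extract_word_py line position out) := by unfold Spec_extract_word_py; infer_instance

-- ===== CLAIM (what is proved, stated in full; the proofs are below) =====
def Claim_equal_extract_word_py : Prop := ∀ (line : String) (position : Int), Dom_extract_word_py line position → Spec_extract_word_py line position (extract_word_py line position)

-- ===== LEMMAS AND PROOFS =====

-- word characters are never whitespace, so A's final strip() is the identity
lemma isW_not_space {c : Char} (h : isW c = true) : PySem.Chars.isspace c = false := by
  simp only [isW, PySem.Chars.isalnum, PySem.Chars.isalpha, PySem.Chars.isdigit,
    PySem.Chars.isupper, PySem.Chars.islower, PySem.Chars.isspace, Bool.or_eq_true,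
    Bool.and_eq_true, decide_eq_true_eq, beq_iff_eq, Char.le_def, UInt32.le_iff_toNat_le] at h ⊢
  have e1 : ('A').val.toNat = 65 := rfl
  have e2 : ('Z').val.toNat = 90 := rfl
  have e3 : ('a').val.toNat = 97 := rfl
  have e4 : ('z').val.toNat = 122 := rfl
  have e5 : ('0').val.toNat = 48 := rfl
  have e6 : ('9').val.toNat = 57 := rfl
  rcases h with ((h|h)|h)|h
  · simp only [Bool.or_eq_false_iff, Bool.and_eq_false_iff, decide_eq_false_iff_not, Char.toNat] at *; omega
  · simp only [Bool.or_eq_false_iff, Bool.and_eq_false_iff, decide_eq_false_iff_not, Char.toNat] at *; omega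
  · simp only [Bool.or_eq_false_iff, Bool.and_eq_false_iff, decide_eq_false_iff_not, Char.toNat] at *; omega
  · subst h; decide

lemma goLeft_le (cs : List Char) (p : Nat) : goLeft cs p ≤ p := by
  induction p with
  | zero => simp [goLeft]
  | succ s ih => simp only [goLeft]; split <;> omega

lemma goLeft_word (cs : List Char) (p : Nat) :
    ∀ j, goLeft cs p ≤ j → j < p → isW (cs.getD j ' ') = true := by
  induction p with
  | zero => omega
  | succ s ih =>
    intro j h1 h2
    simp only [goLeft] at h1
    split at h1
    · rcases Nat.lt_or_ge j s with h | h
      · exact ih j h1 h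
      · have : j = s := by omega
        subst this; assumption
    · omega

lemma goLeft_eq (cs : List Char) (p st : Nat) (h1 : st ≤ p)
    (h2 : st = 0 ∨ isW (cs.getD (st - 1) ' ') = false)
    (h3 : ∀ j, st ≤ j → j < p → isW (cs.getD j ' ') = true) : goLeft cs p = st := by
  induction p with
  | zero => simp [goLeft]; omega
  | succ s ih =>
    rcases Nat.lt_or_ge st (s + 1) with h | h
    · have hw : isW (cs.getD s ' ') = true := h3 s (by omega) (by omega)
      simp only [goLeft, hw, if_true]
      exact ih (by omega) (fun j a b => h3 j a (by omega))
    · have : st = s + 1 := by omega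
      subst this
      rcases h2 with h2 | h2
      · omega
      · simp only [goLeft]
        simp at h2
        simp [h2]

lemma goRight_le (cs : List Char) (e : Nat) (h : e ≤ cs.length) : goRight cs e ≤ cs.length := by
  fun_induction goRight with
  | case1 e h ih => exact ih (by omega)
  | case2 e h => omega

lemma goRight_ge (cs : List Char) (e : Nat) : e ≤ goRight cs e := by
  fun_induction goRight with
  | case1 e h ih => omega
  | case2 e h => omega

lemma goRight_word (cs : List Char) (e : Nat) :
    ∀ j, e ≤ j → j < goRight cs e → isW (cs.getD j ' ') = true := by
  fun_induction goRight with
  | case1 e h ih =>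
    intro j h1 h2
    rcases Nat.lt_or_ge e j with h' | h'
    · exact ih j (by omega) h2
    · have : j = e := by omega
      subst this; exact h.2
  | case2 e h =>
    intro j h1 h2; omega

lemma goRight_step (cs : List Char) (e : Nat) (he : e < cs.length) (hw : isW (cs.getD e ' ') = true) :
    goRight cs e = goRight cs (e + 1) := by
  rw [goRight, dif_pos ⟨he, hw⟩]

lemma goRight_stop (cs : List Char) (e : Nat) (hw : ¬ (e < cs.length ∧ isW (cs.getD e ' ') = true)) :
    goRight cs e = e := by
  rw [goRight, dif_neg hw]

lemma runScan_dead (l : List Char) (p : Nat) : ∀ n i s, l.length - i ≤ n → p < i →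
    (∀ st, s = some st → p < st) → runScan l p (l.drop i) i s = "" := by
  intro n
  induction n with
  | zero =>
    intro i s hn hp hs
    rw [List.drop_eq_nil_of_le (by omega)]
    cases s with
    | none => simp [runScan]
    | some st => have := hs st rfl; simp only [runScan]; rw [if_neg (by omega)]
  | succ n ih =>
    intro i s hn hp hs
    rcases Nat.lt_or_ge i l.length with hlt | hge
    · rw [List.drop_eq_getElem_cons hlt]
      cases s with
      | none =>
        simp only [runScan]
        split
        · exact ih (i+1) (some i) (by omega) (by omega) (by intro st h; cases h; omega)
        · exact ih (i+1) none (by omega) (by omega) (by simp)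
      | some st =>
        have hst := hs st rfl
        simp only [runScan]
        split
        · exact ih (i+1) (some st) (by omega) (by omega) (by intro st' h; cases h; omega)
        · rw [if_neg (by omega)]
          exact ih (i+1) none (by omega) (by omega) (by simp)
    · rw [List.drop_eq_nil_of_le hge]
      cases s with
      | none => simp [runScan]
      | some st => have := hs st rfl; simp only [runScan]; rw [if_neg (by omega)]

lemma runScan_open (l : List Char) (p : Nat) : ∀ n i st, l.length - i ≤ n → st ≤ p → p < i → i ≤ l.length →
    (∀ j, st ≤ j → j < i → isW (l.getD j ' ') = true) →
    runScan l p (l.drop i) i (some st) = String.ofList ((l.drop st).take (goRight l i - st)) := by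
  intro n
  induction n with
  | zero =>
    intro i st hn h1 h2 h3 h4
    have hi : i = l.length := by omega
    subst hi
    rw [List.drop_eq_nil_of_le (le_refl _)]
    simp only [runScan]
    rw [if_pos h1, goRight_stop l l.length (by omega)]
    rw [List.take_of_length_le (by simp)]
  | succ n ih =>
    intro i st hn h1 h2 h3 h4
    rcases Nat.lt_or_ge i l.length with hlt | hge
    · rw [List.drop_eq_getElem_cons hlt]
      have hgd : l.getD i ' ' = l[i] := List.getD_eq_getElem l ' ' hlt
      simp only [runScan]
      by_cases hw : isW l[i] = true
      · rw [if_pos hw]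
        rw [ih (i+1) st (by omega) h1 (by omega) (by omega)
          (by intro j hj1 hj2
              rcases Nat.lt_or_ge j i with h' | h'
              · exact h4 j hj1 h'
              · have : j = i := by omega
                subst this; rw [hgd]; exact hw)]
        rw [← goRight_step l i hlt (by rw [hgd]; exact hw)]
      · rw [if_neg (by simp [hw]), if_pos ⟨h1, by omega⟩]
        rw [goRight_stop l i (by rw [hgd]; intro h; exact hw h.2)]
    · have hi : i = l.length := by omega
      subst hi
      rw [List.drop_eq_nil_of_le (le_refl _)]
      simp only [runScan]
      rw [if_pos h1, goRight_stop l l.length (by omega)]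
      rw [List.take_of_length_le (by simp)]

def RunInv (l : List Char) (i : Nat) (s : Option Nat) : Prop :=
  (s = none → i = 0 ∨ isW (l.getD (i - 1) ' ') = false) ∧
  (∀ st, s = some st → st ≤ i ∧ (st = 0 ∨ isW (l.getD (st - 1) ' ') = false) ∧
    ∀ j, st ≤ j → j < i → isW (l.getD j ' ') = true)

lemma runScan_at_p (l : List Char) (p : Nat) (hp : p < l.length) (s : Option Nat) (hinv : RunInv l p s) :
    runScan l p (l.drop p) p s =
      String.ofList ((l.drop (goLeft l p)).take (goRight l p - goLeft l p)) := by
    have hlt : p < l.length := hp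
    rw [List.drop_eq_getElem_cons hlt]
    have hgd : l.getD p ' ' = l[p] := List.getD_eq_getElem l ' ' hlt
    by_cases hw : isW l[p] = true
    · -- position sits on a word char
      have hstep : goRight l p = goRight l (p+1) := goRight_step l p hlt (by rw [hgd]; exact hw)
      cases s with
      | none =>
        have hnone := hinv.1 rfl
        have hgl : goLeft l p = p := goLeft_eq l p p (le_refl _) hnone (by omega)
        simp only [runScan]
        rw [if_pos hw]
        rw [runScan_open l p (l.length - (p+1)) (p+1) p (le_refl _) (le_refl _) (by omega) (by omega)
          (by intro j hj1 hj2
              have : j = p := by omega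
              subst this; rw [hgd]; exact hw)]
        rw [hgl, hstep]
      | some st =>
        obtain ⟨hst1, hst2, hst3⟩ := hinv.2 st rfl
        have hgl : goLeft l p = st := goLeft_eq l p st hst1 hst2 hst3
        simp only [runScan]
        rw [if_pos hw]
        rw [runScan_open l p (l.length - (p+1)) (p+1) st (le_refl _) hst1 (by omega) (by omega)
          (by intro j hj1 hj2
              rcases Nat.lt_or_ge j p with h' | h'
              · exact hst3 j hj1 h'
              · have : j = p := by omega
                subst this; rw [hgd]; exact hw)]
        rw [hgl, hstep]
    · -- position sits on a non-word char
      have hwf : isW l[p] = false := by simpa using hw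
      have hstop : goRight l p = p := goRight_stop l p (by rw [hgd]; intro h; exact hw h.2)
      cases s with
      | none =>
        have hnone := hinv.1 rfl
        have hgl : goLeft l p = p := goLeft_eq l p p (le_refl _) hnone (by omega)
        simp only [runScan]
        rw [if_neg (by simp [hwf])]
        rw [runScan_dead l p (l.length - (p+1)) (p+1) none (le_refl _) (by omega) (by simp)]
        rw [hgl, hstop]
        simp
      | some st =>
        obtain ⟨hst1, hst2, hst3⟩ := hinv.2 st rfl
        have hgl : goLeft l p = st := goLeft_eq l p st hst1 hst2 hst3
        simp only [runScan]
        rw [if_neg (by simp [hwf]), if_pos ⟨hst1, le_refl _⟩]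
        rw [hgl, hstop]

lemma runScan_main (l : List Char) (p : Nat) (hp : p < l.length) : ∀ n i s, p - i ≤ n → i ≤ p → RunInv l i s →
    runScan l p (l.drop i) i s =
      String.ofList ((l.drop (goLeft l p)).take (goRight l p - goLeft l p)) := by
  intro n
  induction n with
  | zero =>
    intro i s hn hi hinv
    obtain rfl : i = p := by omega
    exact runScan_at_p l _ hp s hinv
  | succ n ih =>
    intro i s hn hi hinv
    rcases Nat.lt_or_ge i p with hlt | hge
    · have hil : i < l.length := by omega
      rw [List.drop_eq_getElem_cons hil]
      have hgd : l.getD i ' ' = l[i] := List.getD_eq_getElem l ' ' hil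
      cases s with
      | none =>
        simp only [runScan]
        by_cases hw : isW l[i] = true
        · rw [if_pos hw]
          refine ih (i+1) (some i) (by omega) (by omega) ?_
          refine ⟨by simp, ?_⟩
          intro st h; cases h
          refine ⟨by omega, ?_, ?_⟩
          · rcases hinv.1 rfl with h | h
            · left; omega
            · right; exact h
          · intro j hj1 hj2
            have : j = i := by omega
            subst this; rw [hgd]; exact hw
        · rw [if_neg (by simpa using hw)]
          refine ih (i+1) none (by omega) (by omega) ?_
          refine ⟨fun _ => Or.inr ?_, by simp⟩
          simp only [Nat.add_sub_cancel, hgd]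
          simpa using hw
      | some st =>
        obtain ⟨hst1, hst2, hst3⟩ := hinv.2 st rfl
        simp only [runScan]
        by_cases hw : isW l[i] = true
        · rw [if_pos hw]
          refine ih (i+1) (some st) (by omega) (by omega) ?_
          refine ⟨by simp, ?_⟩
          intro st' h; cases h
          refine ⟨by omega, hst2, ?_⟩
          intro j hj1 hj2
          rcases Nat.lt_or_ge j i with h' | h'
          · exact hst3 j hj1 h'
          · have : j = i := by omega
            subst this; rw [hgd]; exact hw
        · rw [if_neg (by simpa using hw), if_neg (by omega)]
          refine ih (i+1) none (by omega) (by omega) ?_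
          refine ⟨fun _ => Or.inr ?_, by simp⟩
          simp only [Nat.add_sub_cancel, hgd]
          simpa using hw
    · obtain rfl : i = p := by omega
      exact runScan_at_p l _ hp s hinv

lemma dropWhile_of_false {L : List Char} {q : Char → Bool} (h : ∀ c ∈ L, q c = false) :
    L.dropWhile q = L := by
  cases L with
  | nil => rfl
  | cons c t => rw [List.dropWhile_cons_of_neg (by simp [h c (by simp)])]

lemma strip_of_word (L : List Char) (h : ∀ c ∈ L, isW c = true) : PySem.Chars.strip L = L := by
  have hns : ∀ c ∈ L, PySem.Chars.isspace c = false := fun c hc => isW_not_space (h c hc)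
  unfold PySem.Chars.strip PySem.Chars.rstrip PySem.Chars.lstrip
  rw [dropWhile_of_false hns, dropWhile_of_false (by simpa using hns), List.reverse_reverse]

lemma word_slice_all (cs : List Char) (p : Nat) (hp : p < cs.length) :
    ∀ c ∈ (cs.drop (goLeft cs p)).take (goRight cs p - goLeft cs p), isW c = true := by
  intro c hc
  rw [List.mem_iff_getElem] at hc
  obtain ⟨k, hk, hck⟩ := hc
  have hglp := goLeft_le cs p
  have hgrp := goRight_ge cs p
  have hgrl := goRight_le cs p (by omega)
  have hklen : k < cs.length - goLeft cs p := by
    have := hk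
    simp [List.length_take, List.length_drop] at this
    omega
  have hke : goLeft cs p + k < goRight cs p := by
    have := hk
    simp [List.length_take, List.length_drop] at this
    omega
  have : ((cs.drop (goLeft cs p)).take (goRight cs p - goLeft cs p))[k] = cs[goLeft cs p + k]'(by omega) := by
    rw [List.getElem_take, List.getElem_drop]
  rw [this] at hck
  have hgd : cs.getD (goLeft cs p + k) ' ' = cs[goLeft cs p + k]'(by omega) :=
    List.getD_eq_getElem cs ' ' (by omega)
  rcases Nat.lt_or_ge (goLeft cs p + k) p with h' | h'
  · have := goLeft_word cs p (goLeft cs p + k) (by omega) h'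
    rw [hgd, hck] at this; exact this
  · have := goRight_word cs p (goLeft cs p + k) h' hke
    rw [hgd, hck] at this; exact this

-- ===== VERDICT (by name: the statement is the Claim_ definition above) =====
theorem extract_word_py_spec : Claim_equal_extract_word_py := by
  intro line position _
  unfold Spec_extract_word_py extract_word_py extract_word_py_alt
  by_cases hguard : (line.toList.isEmpty || decide (position < 0) || decide ((line.toList.length : Int) ≤ position)) = true
  · simp only [extract_word_py, extract_word_py_alt, hguard, if_true]
  · simp only [extract_word_py, extract_word_py_alt, hguard]
    simp only [Bool.or_eq_true, decide_eq_true_eq, not_or, List.isEmpty_iff] at hguard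
    obtain ⟨⟨h1, h2⟩, h3⟩ := hguard
    set cs := line.toList with hcs
    have hp : position.toNat < cs.length := by omega
    have hmain := runScan_main cs position.toNat hp position.toNat 0 none (by omega) (by omega)
      ⟨fun _ => Or.inl rfl, by simp⟩
    rw [List.drop_zero] at hmain
    rw [hmain]
    have hslice : PySem.Chars.slice cs (some ((goLeft cs position.toNat : Nat) : Int))
        (some ((goRight cs position.toNat : Nat) : Int)) =
        (cs.drop (goLeft cs position.toNat)).take (goRight cs position.toNat - goLeft cs position.toNat) := by
      simp only [PySem.Chars.slice_eq_listSlice, Nat.cast_nonneg, PySem.List.slice_toNat, Int.toNat_natCast]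
    rw [hslice, strip_of_word _ (word_slice_all cs position.toNat hp)]
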